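-- pv_equiv track=rewrite | github.com/rajbhupendra588/ai-uml | backend/github_repo.py | _detect_monorepo_projects
-- ===== SOURCE A (Python) =====
-- MONOREPO_CONTAINERS = ["apps", "app", "packages", "pkg", "projects", "services", "examples", "tools"]
--
-- MAX_MONOREPO_PROJECTS = 25
--
-- MONOREPO_PRIORITY = {"apps": 0, "app": 0, "packages": 1, "pkg": 1, "services": 2, "projects": 2, "tools": 3, "examples": 4}
--
-- def _detect_monorepo_projects(tree: list[dict]) -> tuple[list[str], int]:
--     """
--     Detect monorepo structure: apps/*, packages/*, projects/*, etc.
--     Returns (project_paths, total_count). Paths capped at MAX_MONOREPO_PROJECTS;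
--     apps/packages prioritized. total_count is the full count before cap.
--     """
--     top_dirs: set[str] = set()
--     for entry in tree:
--         path = (entry.get("path") or "").strip()
--         if not path or path.startswith(".") or "/" not in path:
--             continue
--         top = path.split("/")[0].lower()
--         if top in (c.lower() for c in MONOREPO_CONTAINERS):
--             top_dirs.add(path.split("/")[0])
--     if not top_dirs:
--         return [], 0
--     all_projects: list[str] = []
--     for entry in tree:
--         path = (entry.get("path") or "").strip()
--         if not path or path.startswith("."):
--             continue
--         parts = path.split("/")
--         if len(parts) < 2:
--             continue
--         top = parts[0]
--         if top not in top_dirs: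
--             continue
--         sub = parts[1]
--         if sub.startswith(".") or sub.endswith(".json"):  # skip config files, not project dirs
--             continue
--         project_path = f"{parts[0]}/{parts[1]}"
--         if project_path not in all_projects:
--             all_projects.append(project_path)
--     # Sort: apps first, then packages, then others; then by name
--     def sort_key(p: str) -> tuple[int, str]:
--         top = p.split("/")[0].lower()
--         return (MONOREPO_PRIORITY.get(top, 5), p)
--
--     sorted_projects = sorted(set(all_projects), key=sort_key)
--     total = len(sorted_projects)
--     if total > MAX_MONOREPO_PROJECTS:
--         # Keep apps + packages fully; truncate examples/others
--         kept = [p for p in sorted_projects if p.split("/")[0].lower() in ("apps", "app", "packages", "pkg")]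
--         others = [p for p in sorted_projects if p not in kept]
--         remaining = MAX_MONOREPO_PROJECTS - len(kept)
--         if remaining > 0 and others:
--             kept.extend(others[:remaining])
--         return kept, total
--     return sorted_projects, total
-- ===== SOURCE B (Python) =====
-- MONOREPO_CONTAINERS = ["apps", "app", "packages", "pkg", "projects", "services", "examples", "tools"]
--
-- MAX_MONOREPO_PROJECTS = 25
--
-- MONOREPO_PRIORITY = {"apps": 0, "app": 0, "packages": 1, "pkg": 1, "services": 2, "projects": 2, "tools": 3, "examples": 4}
--
--
-- def _detect_monorepo_projects(tree: list[dict]) -> tuple[list[str], int]: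
--     """Single pass over the tree (no separate top-dir pass): a path contributes a
--     project iff it has >= 2 segments, is not a dotfile path, its top segment is a
--     monorepo container (case-insensitively) and the second segment is neither a
--     dotfile nor a .json file.  Dedup once, sort by (priority, name); because the
--     high-priority (apps/app/packages/pkg) projects form a prefix of that order,
--     the cap is a single slice projects[:max(n_core, MAX)]."""
--     containers = {c.lower() for c in MONOREPO_CONTAINERS}
--     found: list[str] = []
--     for entry in tree:
--         path = (entry.get("path") or "").strip()
--         if path.startswith("."):
--             continue
--         parts = path.split("/")
--         if len(parts) < 2 or parts[0].lower() not in containers: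
--             continue
--         sub = parts[1]
--         if sub.startswith(".") or sub.endswith(".json"):
--             continue
--         found.append("/".join((parts[0], sub)))
--     projects = sorted(dict.fromkeys(found),
--                       key=lambda p: (MONOREPO_PRIORITY[p.split("/")[0].lower()], p))
--     total = len(projects)
--     if total <= MAX_MONOREPO_PROJECTS:
--         return projects, total
--     n_core = sum(1 for p in projects
--                  if p.split("/")[0].lower() in ("apps", "app", "packages", "pkg"))
--     return projects[:max(n_core, MAX_MONOREPO_PROJECTS)], total
-- ===== Notes on version B (the rewrite author's own statement) =====
-- stated objective: simpler
-- what changed: Collapsed A's two tree scans (top-dir prep pass building a set, then a project pass checking membership in it) into one pass that tests the lowercased top segment against the container names directly, deduplicates once, and replaced A's kept/others list surgery for the >25 cap by a single slice projects[:max(n_core, MAX)], which is valid because the apps/app/packages/pkg projects form a prefix of the (priority, name) sort order.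
import Mathlib
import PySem

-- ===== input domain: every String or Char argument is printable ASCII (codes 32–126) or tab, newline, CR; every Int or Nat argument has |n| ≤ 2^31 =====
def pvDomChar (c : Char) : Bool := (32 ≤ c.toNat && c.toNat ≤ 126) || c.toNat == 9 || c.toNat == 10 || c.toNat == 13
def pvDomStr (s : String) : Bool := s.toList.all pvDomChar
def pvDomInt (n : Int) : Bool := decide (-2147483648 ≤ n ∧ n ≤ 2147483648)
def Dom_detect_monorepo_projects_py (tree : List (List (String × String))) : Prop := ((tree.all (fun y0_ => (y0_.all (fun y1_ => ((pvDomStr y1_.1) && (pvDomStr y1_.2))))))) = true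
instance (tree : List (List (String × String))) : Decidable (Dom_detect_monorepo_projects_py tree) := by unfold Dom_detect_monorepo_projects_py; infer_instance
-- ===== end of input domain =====

-- ===== PORT A =====
-- B differs from A by a single tree pass (no top-dir prep pass) and a one-slice cap; equal return value (objective: simpler).
-- shared helpers: the SAME Python subexpressions appear verbatim in both A and B
-- MONOREPO_CONTAINERS
def pvContainers : List String := ["apps", "app", "packages", "pkg", "projects", "services", "examples", "tools"]
-- MONOREPO_PRIORITY
def pvPriority : PySem.Dict String Int :=
  PySem.Dict.ofList [("apps", 0), ("app", 0), ("packages", 1), ("pkg", 1), ("services", 2), ("projects", 2), ("tools", 3), ("examples", 4)]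
-- (entry.get("path") or "").strip()   ('or ""' only fires on None/""; both map to "")
def pvPath (entry : List (String × String)) : String :=
  PySem.Str.strip (((PySem.Dict.ofList entry).get? "path").getD "")
-- path.split("/")  (sep nonempty, so split? never raises)
def pvParts (path : String) : List String := (PySem.Str.split? path "/").getD []
-- p.split("/")[0].lower()  (split is never empty, so the [0] never raises)
def pvLowerTop (p : String) : String := PySem.Str.lower (PySem.List.pyGetD (pvParts p) 0 "")
-- A: MONOREPO_PRIORITY.get(top, 5); B: MONOREPO_PRIORITY[top] — there the key is always a container
-- name and every container is a key of MONOREPO_PRIORITY, so KeyError is impossible and the default is unreachable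
def pvKey1 (p : String) : Int := (pvPriority.get? (pvLowerTop p)).getD 5
-- p.split("/")[0].lower() in ("apps", "app", "packages", "pkg")
def pvCore (p : String) : Bool := ["apps", "app", "packages", "pkg"].contains (pvLowerTop p)

-- first loop of A (builds top_dirs)
def pvPass1 (td : PySem.Set String) (entry : List (String × String)) : PySem.Set String :=
  let path := pvPath entry
  if path == "" || PySem.Str.startswith path "." || !(PySem.Str.isIn "/" path) then td
  else
    let top := PySem.Str.lower (PySem.List.pyGetD (pvParts path) 0 "")
    if (pvContainers.map PySem.Str.lower).contains top then
      PySem.Set.add td (PySem.List.pyGetD (pvParts path) 0 "")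
    else td

def pvTopDirs (tree : List (List (String × String))) : PySem.Set String :=
  tree.foldl pvPass1 PySem.Set.empty

-- second loop of A (builds all_projects)
def pvStepA (td : PySem.Set String) (acc : List String) (entry : List (String × String)) : List String :=
  let path := pvPath entry
  if path == "" || PySem.Str.startswith path "." then acc
  else
    let parts := pvParts path
    if parts.length < 2 then acc
    else
      let top := PySem.List.pyGetD parts 0 ""
      if !(PySem.Set.contains td top) then acc
      else
        let sub := PySem.List.pyGetD parts 1 ""
        if PySem.Str.startswith sub "." || PySem.Str.endswith sub ".json" then acc
        else
          let pp := PySem.Str.join "/" [top, sub]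
          if acc.contains pp then acc else acc ++ [pp]

def detect_monorepo_projects_py (tree : List (List (String × String))) : List String × Int :=
  let top_dirs := pvTopDirs tree
  if top_dirs = ([] : List String) then ([], 0)
  else
    let all_projects := tree.foldl (pvStepA top_dirs) []
    let sorted_projects := PySem.List.sorted2 (PySem.Set.ofList all_projects) pvKey1 (fun p => p) false
    let total : Int := sorted_projects.length
    if total > 25 then
      let kept := sorted_projects.filter (fun p => pvCore p)
      let others := sorted_projects.filter (fun p => !(kept.contains p))
      let remaining : Int := 25 - (kept.length : Int)
      if remaining > 0 && !others.isEmpty then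
        (kept ++ PySem.List.slice others none (some remaining), total)
      else (kept, total)
    else (sorted_projects, total)

-- ===== PORT B =====
-- single loop of B (builds found)
def pvStepB (containers : PySem.Set String) (acc : List String) (entry : List (String × String)) : List String :=
  let path := pvPath entry
  if PySem.Str.startswith path "." then acc
  else
    let parts := pvParts path
    if parts.length < 2 || !(PySem.Set.contains containers (PySem.Str.lower (PySem.List.pyGetD parts 0 ""))) then acc
    else
      let sub := PySem.List.pyGetD parts 1 ""
      if PySem.Str.startswith sub "." || PySem.Str.endswith sub ".json" then acc
      else acc ++ [PySem.Str.join "/" [PySem.List.pyGetD parts 0 "", sub]]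

def detect_monorepo_projects_py_alt (tree : List (List (String × String))) : List String × Int :=
  let containers : PySem.Set String := PySem.Set.ofList (pvContainers.map PySem.Str.lower)
  let found := tree.foldl (pvStepB containers) []
  let projects := PySem.List.sorted2 (PySem.List.dedup found) pvKey1 (fun p => p) false
  let total : Int := projects.length
  if total ≤ 25 then (projects, total)
  else
    let n_core : Int := (projects.map (fun p => if pvCore p then (1 : Int) else 0)).sum
    (PySem.List.slice projects none (some (max n_core 25)), total)

-- ===== PRECONDITION & SPEC =====
def Spec_detect_monorepo_projects_py (tree : List (List (String × String))) (out : List String × Int) : Prop := out = detect_monorepo_projects_py_alt tree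
instance (tree : List (List (String × String))) (out : List String × Int) : Decidable (Spec_detect_monorepo_projects_py tree out) := by unfold Spec_detect_monorepo_projects_py; infer_instance

-- ===== CLAIM (what is proved, stated in full; the proofs are below) =====
def Claim_equal_detect_monorepo_projects_py : Prop := ∀ (tree : List (List (String × String))), Dom_detect_monorepo_projects_py tree → Spec_detect_monorepo_projects_py tree (detect_monorepo_projects_py tree)

-- ===== LEMMAS AND PROOFS =====

-- the per-entry data both loops extract
def pvTop (e : List (String × String)) : String := PySem.List.pyGetD (pvParts (pvPath e)) 0 ""

def pvProj (e : List (String × String)) : String :=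
  PySem.Str.join "/" [PySem.List.pyGetD (pvParts (pvPath e)) 0 "", PySem.List.pyGetD (pvParts (pvPath e)) 1 ""]

-- acceptance condition of A's first loop
def pvP1ok (e : List (String × String)) : Bool :=
  let path := pvPath e
  !(path == "" || PySem.Str.startswith path "." || !(PySem.Str.isIn "/" path)) &&
    (pvContainers.map PySem.Str.lower).contains (PySem.Str.lower (PySem.List.pyGetD (pvParts path) 0 ""))

-- acceptance condition of A's second loop (relative to a top_dirs set)
def pvOkA (td : PySem.Set String) (e : List (String × String)) : Bool :=
  let path := pvPath e
  !(path == "" || PySem.Str.startswith path ".") && !decide ((pvParts path).length < 2) &&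
    PySem.Set.contains td (PySem.List.pyGetD (pvParts path) 0 "") &&
    !(PySem.Str.startswith (PySem.List.pyGetD (pvParts path) 1 "") "." ||
      PySem.Str.endswith (PySem.List.pyGetD (pvParts path) 1 "") ".json")

-- acceptance condition of B's single loop
def pvOkB (e : List (String × String)) : Bool :=
  let path := pvPath e
  !(PySem.Str.startswith path ".") &&
    !(decide ((pvParts path).length < 2) ||
      !(PySem.Set.contains (PySem.Set.ofList (pvContainers.map PySem.Str.lower))
          (PySem.Str.lower (PySem.List.pyGetD (pvParts path) 0 "")))) &&
    !(PySem.Str.startswith (PySem.List.pyGetD (pvParts path) 1 "") "." ||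
      PySem.Str.endswith (PySem.List.pyGetD (pvParts path) 1 "") ".json")

theorem pvPass1_eq (td : PySem.Set String) (e : List (String × String)) :
    pvPass1 td e = if pvP1ok e then PySem.Set.add td (pvTop e) else td := by
  simp only [pvPass1, pvP1ok, pvTop]
  split_ifs with h1 h2 h3 h4 h5 <;> try rfl
  all_goals simp_all
  obtain ⟨a, ha, he⟩ := h5
  exact absurd he (h3 a ha)

theorem pvStepA_eq (td : PySem.Set String) (acc : List String) (e : List (String × String)) :
    pvStepA td acc e = if pvOkA td e then PySem.Set.add acc (pvProj e) else acc := by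
  simp only [pvStepA, pvOkA, pvProj, PySem.Set.add, PySem.Set.contains]
  split_ifs <;> try rfl
  all_goals simp_all

theorem pvStepB_eq (acc : List String) (e : List (String × String)) :
    pvStepB (PySem.Set.ofList (pvContainers.map PySem.Str.lower)) acc e =
      if pvOkB e then acc ++ [pvProj e] else acc := by
  simp only [pvStepB, pvOkB, pvProj]
  split_ifs with h1 h2 h3 h4 <;> try rfl
  all_goals simp_all
  obtain ⟨⟨hlen, a, ha, he⟩, -⟩ := h4
  rcases h3 with h2 | h2
  · omega
  · exact absurd he (h2 a ha)

theorem pvP1ok_contains (e : List (String × String)) (h : pvP1ok e = true) :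
    (pvContainers.map PySem.Str.lower).contains (PySem.Str.lower (pvTop e)) = true := by
  unfold pvP1ok at h
  exact (Bool.and_eq_true _ _ |>.mp h).2

-- top_dirs is exactly the set of accepted tops
theorem pvTopDirs_eq (tree : List (List (String × String))) :
    pvTopDirs tree = PySem.Set.update PySem.Set.empty ((tree.filter pvP1ok).map pvTop) := by
  unfold pvTopDirs
  rw [PySem.List.foldl_congr_mem tree pvPass1
        (fun td e => if pvP1ok e = true then PySem.Set.add td (pvTop e) else td) _
        (fun acc x _ => pvPass1_eq acc x),
      PySem.List.foldl_if_eq_foldl_filter pvP1ok (fun td e => PySem.Set.add td (pvTop e)),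
      ← PySem.Set.update_map_eq_foldl_add]

theorem pv_mem_topdirs_iff (tree : List (List (String × String))) (x : String) :
    x ∈ pvTopDirs tree ↔ ∃ e ∈ tree, pvP1ok e = true ∧ pvTop e = x := by
  rw [pvTopDirs_eq, PySem.Set.mem_update]
  constructor
  · rintro (hx | hx)
    · exact absurd hx (List.not_mem_nil)
    · obtain ⟨e, he, rfl⟩ := List.mem_map.mp hx
      obtain ⟨he', hok⟩ := List.mem_filter.mp he
      exact ⟨e, he', hok, rfl⟩
  · rintro ⟨e, he, hok, rfl⟩
    exact Or.inr (List.mem_map.mpr ⟨e, List.mem_filter.mpr ⟨he, hok⟩, rfl⟩)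

-- the split("/") machinery: ≥ 2 parts forces "/" in path, and "" has exactly one part
theorem pv_go_not_infix (sep : List Char) (fuel : Nat) :
    ∀ (l cur : List Char) (acc : List (List Char)), ¬ sep <:+: l →
    PySem.Chars.splitOn.go sep fuel l cur acc = ((cur.reverse ++ l) :: acc).reverse := by
  induction fuel with
  | zero => intro l cur acc h; rfl
  | succ fuel ih =>
    intro l cur acc h
    cases l with
    | nil => simp [PySem.Chars.splitOn.go]
    | cons c rest =>
      have hnp : sep.isPrefixOf (c :: rest) = false := by
        by_contra hb
        exact h ((List.isPrefixOf_iff_prefix.mp (by simpa using hb)).isInfix)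
      have hstep : PySem.Chars.splitOn.go sep (fuel+1) (c :: rest) cur acc =
          if sep.isPrefixOf (c :: rest) then
            PySem.Chars.splitOn.go sep fuel (List.drop sep.length (c :: rest)) [] (cur.reverse :: acc)
          else PySem.Chars.splitOn.go sep fuel rest (c :: cur) acc := rfl
      rw [hstep, hnp]
      simp only [Bool.false_eq_true, if_false]
      rw [ih rest (c :: cur) acc (fun hi => h (List.infix_cons hi))]
      simp

theorem pv_isIn_of_two_le (path : String) (h : 2 ≤ (pvParts path).length) :
    PySem.Str.isIn "/" path = true := by
  by_contra hb
  have hni : ¬ ['/'] <:+: path.toList := by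
    rw [← PySem.Chars.isIn_eq_false_iff]
    simp only [PySem.Str.isIn, String.reduceToList] at hb
    exact Bool.eq_false_iff.mpr hb
  have hs : PySem.Chars.splitOn path.toList ['/'] = [path.toList] := by
    rw [PySem.Chars.splitOn, pv_go_not_infix _ _ _ _ _ hni]; simp
  rw [pvParts, PySem.Str.split?] at h
  simp only [String.reduceToList, PySem.Chars.split?] at h
  simp [hs] at h

theorem pv_parts_ne_empty (path : String) (h : 2 ≤ (pvParts path).length) : path ≠ "" := by
  rintro rfl
  have : pvParts "" = [""] := by decide
  rw [this] at h
  simp at h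

-- the two loops accept the same entries of the tree
theorem pvOkA_eq_okB (tree : List (List (String × String))) (e : List (String × String))
    (he : e ∈ tree) : pvOkA (pvTopDirs tree) e = pvOkB e := by
  rw [Bool.eq_iff_iff]
  unfold pvOkA pvOkB
  simp only [Bool.and_eq_true, Bool.not_eq_true']
  simp only [Bool.or_eq_false_iff, beq_eq_false_iff_ne, ne_eq, decide_eq_false_iff_not, not_lt,
    Bool.not_eq_false']
  constructor
  · rintro ⟨⟨⟨⟨hne, hdot⟩, hlen⟩, htd⟩, hsub⟩
    refine ⟨⟨hdot, hlen, ?_⟩, hsub⟩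
    have hx : PySem.List.pyGetD (pvParts (pvPath e)) 0 "" ∈ pvTopDirs tree := by
      simpa using htd
    obtain ⟨e', he', hok', htop'⟩ := (pv_mem_topdirs_iff tree _).mp hx
    have hc := pvP1ok_contains e' hok'
    rw [htop'] at hc
    simp only [PySem.Set.contains_iff, PySem.Set.mem_ofList]
    simpa using hc
  · rintro ⟨⟨hdot, hlen, hC⟩, hsub⟩
    have h1 : ¬ pvPath e = "" := pv_parts_ne_empty _ hlen
    refine ⟨⟨⟨⟨h1, hdot⟩, hlen⟩, ?_⟩, hsub⟩
    have hok : pvP1ok e = true := by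
      unfold pvP1ok
      simp only [Bool.and_eq_true, Bool.not_eq_true', Bool.or_eq_false_iff,
        beq_eq_false_iff_ne, ne_eq, Bool.not_eq_false']
      refine ⟨⟨⟨pv_parts_ne_empty _ hlen, hdot⟩, pv_isIn_of_two_le _ hlen⟩, ?_⟩
      have := (PySem.Set.contains_iff _ _).mp hC
      rw [PySem.Set.mem_ofList] at this
      simpa using this
    have hmem := (pv_mem_topdirs_iff tree (pvTop e)).mpr ⟨e, he, hok, rfl⟩
    rw [pvTop] at hmem
    simpa [PySem.Set.contains_iff] using hmem

-- A's all_projects is the dedup of B's found list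
theorem pv_core_eq_key (p : String) : pvCore p = decide (pvKey1 p ≤ 1) := by
  have hd : pvPriority = PySem.Dict.mk [("apps", 0), ("app", 0), ("packages", 1), ("pkg", 1),
      ("services", 2), ("projects", 2), ("tools", 3), ("examples", 4)] := by decide
  unfold pvCore pvKey1
  rw [hd]
  generalize pvLowerTop p = t
  rcases eq_or_ne t "apps" with rfl | h1
  · decide
  · rcases eq_or_ne t "app" with rfl | h2
    · decide
    · rcases eq_or_ne t "packages" with rfl | h3
      · decide
      · rcases eq_or_ne t "pkg" with rfl | h4
        · decide
        · simp only [PySem.Dict.get?_mk_cons, List.contains_eq_mem]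
          simp only [beq_iff_eq, Ne.symm h1, Ne.symm h2, Ne.symm h3, Ne.symm h4, if_false]
          simp only [List.mem_cons, List.not_mem_nil, or_false]
          rcases eq_or_ne t "services" with rfl | h5
          · decide
          rcases eq_or_ne t "projects" with rfl | h6
          · decide
          rcases eq_or_ne t "tools" with rfl | h7
          · decide
          rcases eq_or_ne t "examples" with rfl | h8
          · decide
          simp only [Ne.symm h5, Ne.symm h6, Ne.symm h7, Ne.symm h8, if_false]
          simp [h1, h2, h3, h4]
          have he : ({ items := [] } : PySem.Dict String Int).get? t = none := rfl
          rw [he]; norm_num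

-- the sorted2 call is a sort by the lexicographic key (priority, name)
theorem pv_sorted2_eq (xs : List String) (k1 : String → Int) :
    PySem.List.sorted2 xs k1 (fun p => p) false =
    PySem.List.sorted xs (fun p => (toLex ((k1 p, p) : Int × String) : Int ×ₗ String)) false := by
  simp only [PySem.List.sorted2, PySem.List.sorted]
  have hlt : (fun (a b : String) => decide (k1 a < k1 b) || (!decide (k1 b < k1 a) && decide (a < b)))
      = fun a b => decide ((toLex ((k1 a, a) : Int × String) : Int ×ₗ String) < toLex (k1 b, b)) := by
    funext a b
    by_cases h1 : k1 a < k1 b <;> by_cases h2 : k1 b < k1 a <;>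
      simp [Prod.Lex.lt_iff, h1, h2] <;> omega
  simp only [if_neg (by simp : ¬ (false = true))]
  rw [hlt]

theorem pv_pairwise (xs : List String) (k1 : String → Int) :
    (PySem.List.sorted2 xs k1 (fun p => p) false).Pairwise (fun a b => k1 a ≤ k1 b) := by
  rw [pv_sorted2_eq]
  refine (PySem.List.sorted_pairwise xs _).imp ?_
  intro a b hab
  rcases Prod.Lex.le_iff.mp hab with h | ⟨h, _⟩
  · exact le_of_lt h
  · exact le_of_eq h

theorem pv_filter_split {α : Type} (p : α → Bool) :
    ∀ (l : List α), l.Pairwise (fun a b => p b = true → p a = true) →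
    l.filter p ++ l.filter (fun x => !p x) = l := by
  intro l hl
  induction l with
  | nil => rfl
  | cons a t ih =>
    rcases List.pairwise_cons.mp hl with ⟨ha, ht⟩
    by_cases hp : p a = true
    · simp only [List.filter_cons, hp, if_pos, Bool.not_true]
      simpa using ih ht
    · have hall : ∀ b ∈ t, p b = false := fun b hb =>
        Bool.eq_false_iff.mpr (fun hbt => hp (ha b hb hbt))
      have h1 : List.filter p (a :: t) = [] := by
        rw [List.filter_eq_nil_iff]
        intro b hb
        rcases List.mem_cons.mp hb with rfl | hbt
        · simpa using hp
        · simp [hall b hbt]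
      have h2 : List.filter (fun x => !p x) (a :: t) = a :: t := by
        rw [List.filter_eq_self]
        intro b hb
        rcases List.mem_cons.mp hb with rfl | hbt
        · simpa using hp
        · simp [hall b hbt]
      rw [h1, h2]; rfl

theorem pvOkB_p1ok (e : List (String × String)) (h : pvOkB e = true) : pvP1ok e = true := by
  unfold pvOkB at h
  simp only [Bool.and_eq_true, Bool.not_eq_true'] at h
  simp only [Bool.or_eq_false_iff, decide_eq_false_iff_not, not_lt, Bool.not_eq_false'] at h
  obtain ⟨⟨hdot, hlen, hC⟩, -⟩ := h
  unfold pvP1ok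
  simp only [Bool.and_eq_true, Bool.not_eq_true', Bool.or_eq_false_iff,
    beq_eq_false_iff_ne, ne_eq, Bool.not_eq_false']
  refine ⟨⟨⟨pv_parts_ne_empty _ hlen, hdot⟩, pv_isIn_of_two_le _ hlen⟩, ?_⟩
  have := (PySem.Set.contains_iff _ _).mp hC
  rw [PySem.Set.mem_ofList] at this
  simpa using this

-- B's loop collects the accepted projects in order
theorem pv_found_eq (tree : List (List (String × String))) :
    tree.foldl (pvStepB (PySem.Set.ofList (pvContainers.map PySem.Str.lower))) [] =
      (tree.filter pvOkB).map pvProj := by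
  rw [PySem.List.foldl_congr_mem tree _
        (fun acc e => if pvOkB e = true then acc ++ [pvProj e] else acc) []
        (fun acc x _ => pvStepB_eq acc x)]
  simpa using PySem.List.foldl_append_if pvOkB pvProj tree []

-- A's second loop collects the same projects, deduplicated on the fly
theorem pv_allA_eq (tree : List (List (String × String))) :
    tree.foldl (pvStepA (pvTopDirs tree)) [] =
      PySem.Set.ofList ((tree.filter pvOkB).map pvProj) := by
  rw [PySem.List.foldl_congr_mem tree _
        (fun acc e => if pvOkA (pvTopDirs tree) e = true then PySem.Set.add acc (pvProj e) else acc) []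
        (fun acc x _ => pvStepA_eq _ acc x)]
  rw [PySem.List.foldl_congr_mem tree _
        (fun acc e => if pvOkB e = true then PySem.Set.add acc (pvProj e) else acc) []
        (fun acc x hx => by rw [pvOkA_eq_okB tree x hx])]
  rw [PySem.List.foldl_if_eq_foldl_filter pvOkB (fun acc e => PySem.Set.add acc (pvProj e))]
  rw [PySem.Set.ofList_eq_foldl, List.foldl_map]

-- the cap: A's kept/others surgery is one take of the sorted list
theorem pv_trunc (S kept others : List String)
    (hpw : S.Pairwise (fun a b => pvKey1 a ≤ pvKey1 b))
    (hkept : kept = S.filter (fun p => pvCore p))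
    (hothers : others = S.filter (fun p => !(kept.contains p)))
    (h25 : (S.length : Int) > 25) :
    (if (decide (25 - (kept.length : Int) > 0) && !others.isEmpty) = true
       then kept ++ PySem.List.slice others none (some (25 - (kept.length : Int)))
       else kept)
    = PySem.List.slice S none
        (some (max ((S.map (fun p => if pvCore p then (1 : Int) else 0)).sum) 25)) := by
  have hcoreimp : S.Pairwise (fun a b => pvCore b = true → pvCore a = true) := by
    refine hpw.imp ?_
    intro a b hle hb
    rw [pv_core_eq_key] at *
    simp only [decide_eq_true_eq] at *
    omega
  have hoth : others = S.filter (fun x => !pvCore x) := by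
    rw [hothers, hkept]
    refine List.filter_congr ?_
    intro x hx
    by_cases hc : pvCore x = true <;> simp [List.mem_filter, hx, hc]
  have hsplit : kept ++ others = S := by
    rw [hoth, hkept]; exact pv_filter_split _ S hcoreimp
  have hsum : (S.map (fun p => if pvCore p then (1 : Int) else 0)).sum = (kept.length : Int) := by
    rw [PySem.List.sum_map_ite_one_zero, hkept, List.countP_eq_length_filter]
  have hlen : kept.length + others.length = S.length := by
    rw [← hsplit, List.length_append]
  rw [hsum]
  by_cases hk : (kept.length : Int) < 25
  · have hone : others ≠ [] := by
      intro h0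
      rw [h0] at hlen
      simp at hlen
      omega
    rw [if_pos (by simp [List.isEmpty_eq_false_iff, hone]; omega)]
    have hmax : max ((kept.length : Int)) 25 = 25 := by omega
    rw [hmax, PySem.List.slice_to S (by omega), PySem.List.slice_to others (by omega)]
    rw [← hsplit, List.take_append]
    have h0 : (25 : Int).toNat = 25 := rfl
    have h1 : List.take 25 kept = kept := List.take_of_length_le (by omega)
    have h2 : ((25 : Int) - (kept.length : Int)).toNat = 25 - kept.length := by omega
    rw [h0, h1, h2]
  · rw [if_neg (by simp; omega)]
    have hmax : max ((kept.length : Int)) 25 = (kept.length : Int) := by omega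
    rw [hmax, PySem.List.slice_to S (by omega)]
    have h2 : ((kept.length : Int)).toNat = kept.length := by omega
    rw [h2, ← hsplit, List.take_left]

theorem pv_sorted2_nil : PySem.List.sorted2 ([] : List String) pvKey1 (fun p => p) false = [] := rfl

-- ===== VERDICT (by name: the statement is the Claim_ definition above) =====
theorem detect_monorepo_projects_py_spec : Claim_equal_detect_monorepo_projects_py := by
  intro tree _
  unfold Spec_detect_monorepo_projects_py
  simp only [detect_monorepo_projects_py, detect_monorepo_projects_py_alt]
  rw [pv_found_eq, pv_allA_eq, PySem.Set.ofList_ofList, PySem.List.dedup_eq_ofList]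
  by_cases htd : pvTopDirs tree = ([] : List String)
  · rw [if_pos htd]
    have hL : (tree.filter pvOkB).map pvProj = [] := by
      rw [List.map_eq_nil_iff, List.filter_eq_nil_iff]
      intro e he hok
      have := (pv_mem_topdirs_iff tree (pvTop e)).mpr ⟨e, he, pvOkB_p1ok e hok, rfl⟩
      rw [htd] at this
      exact absurd this (List.not_mem_nil)
    rw [hL]
    simp only [PySem.Set.ofList_nil, pv_sorted2_nil, List.length_nil, Nat.cast_zero]
    norm_num
  · rw [if_neg htd]
    set S := PySem.List.sorted2 (PySem.Set.ofList ((tree.filter pvOkB).map pvProj)) pvKey1 (fun p => p) false with hS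
    by_cases h25 : ((S.length : Int) > 25)
    · rw [if_pos h25, if_neg (show ¬ ((S.length : Int) ≤ 25) by omega)]
      have hpw : S.Pairwise (fun a b => pvKey1 a ≤ pvKey1 b) := by
        rw [hS]; exact pv_pairwise _ _
      have htr := pv_trunc S (S.filter (fun p => pvCore p))
        (S.filter (fun p => !((S.filter (fun p => pvCore p)).contains p))) hpw rfl rfl h25
      rw [← apply_ite (fun l : List String => (l, (S.length : Int)))]
      rw [Prod.mk.injEq]
      exact ⟨htr, rfl⟩
    · rw [if_neg h25, if_pos (show ((S.length : Int) ≤ 25) by omega)]
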